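-- pv_equiv track=rewrite | github.com/Lab00700/Algorithm | 프로그래머스/0/181867. x 사이의 개수/x 사이의 개수.py | solution
-- ===== SOURCE A (Python) =====
-- def solution(myString):
--     answer = myString.split('x')
--     t=[]
--     for i in range(len(answer)):
--         if answer[i]=='':
--             t.append(0)
--         else:
--             t.append(len(list(answer[i])))
--     return t
-- ===== SOURCE B (Python) =====
-- def solution(myString):
--     t = []
--     cnt = 0
--     for ch in myString:
--         if ch == 'x':
--             t.append(cnt)
--             cnt = 0
--         else:
--             cnt += 1
--     t.append(cnt)
--     return t
-- ===== Notes on version B (the rewrite author's own statement) =====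
-- stated objective: simpler
-- what changed: Replaces split('x') plus an index-based loop over the segment list with a single character pass that maintains a running segment length, appending and resetting it at each 'x'; no substring objects are built.
import Mathlib
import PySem

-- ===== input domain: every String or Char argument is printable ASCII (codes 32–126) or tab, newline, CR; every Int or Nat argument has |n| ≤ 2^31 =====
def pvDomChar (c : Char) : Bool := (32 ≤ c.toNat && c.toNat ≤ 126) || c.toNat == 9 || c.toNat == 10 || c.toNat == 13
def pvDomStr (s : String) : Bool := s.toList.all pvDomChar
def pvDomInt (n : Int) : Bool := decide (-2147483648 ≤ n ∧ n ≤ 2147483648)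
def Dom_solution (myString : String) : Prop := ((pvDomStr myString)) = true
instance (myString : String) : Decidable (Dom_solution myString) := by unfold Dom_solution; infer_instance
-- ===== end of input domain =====

-- B replaces split('x') + an index loop with one character pass keeping a running
-- segment length (simpler; same O(n) cost).

-- ===== PORT A =====
-- answer = myString.split('x')  (sep is the nonempty literal "x", so split never raises;
-- PySem.Chars.splitOn is the exact sep ≠ "" form of str.split)
-- for i in range(len(answer)): append 0 if answer[i]=='' else len(list(answer[i]))
def solution (myString : String) : List Int :=
  (PySem.List.pyRange 0 ((PySem.Chars.splitOn myString.toList ['x']).length : Int) 1).foldl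
    (fun t i =>
      if PySem.List.pyGetD (PySem.Chars.splitOn myString.toList ['x']) i [] = ([] : List Char) then
        t ++ [(0 : Int)]
      else
        t ++ [((PySem.List.pyGetD (PySem.Chars.splitOn myString.toList ['x']) i []).length : Int)])
    []

-- ===== PORT B =====
-- single pass: running count, emit at each 'x', emit the final count after the loop
def bstep (p : List Int × Int) (ch : Char) : List Int × Int :=
  if ch = 'x' then (p.1 ++ [p.2], 0) else (p.1, p.2 + 1)

def solution_alt (myString : String) : List Int :=
  let st : List Int × Int := myString.toList.foldl bstep ([], 0)
  st.1 ++ [st.2]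

-- ===== PRECONDITION & SPEC =====
def Spec_solution (myString : String) (out : List Int) : Prop := out = solution_alt myString
instance (myString : String) (out : List Int) : Decidable (Spec_solution myString out) := by unfold Spec_solution; infer_instance

-- ===== CLAIM (what is proved, stated in full; the proofs are below) =====
def Claim_equal_solution : Prop := ∀ (myString : String), Dom_solution myString → Spec_solution myString (solution myString)

-- ===== LEMMAS AND PROOFS =====

-- reference splitter: (first segment, remaining segments) of a list split at 'x'
def splitX : List Char → List Char × List (List Char)
  | [] => ([], [])
  | c :: rest =>
    let p := splitX rest
    if c = 'x' then ([], p.1 :: p.2) else (c :: p.1, p.2)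

lemma splitOn_go_x (l : List Char) : ∀ (fuel : ℕ) (cur : List Char)
    (acc : List (List Char)), l.length ≤ fuel →
    PySem.Chars.splitOn.go ['x'] fuel l cur acc =
      acc.reverse ++ ((cur.reverse ++ (splitX l).1) :: (splitX l).2) := by
  induction l with
  | nil =>
    intro fuel cur acc _
    cases fuel <;> simp [PySem.Chars.splitOn.go, splitX]
  | cons c rest ih =>
    intro fuel cur acc h
    cases fuel with
    | zero => simp at h
    | succ f =>
      by_cases hc : c = 'x'
      · subst hc
        rw [show PySem.Chars.splitOn.go ['x'] (f+1) ('x' :: rest) cur acc =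
              PySem.Chars.splitOn.go ['x'] f rest [] (cur.reverse :: acc) by
            simp [PySem.Chars.splitOn.go, List.isPrefixOf]]
        rw [ih f [] (cur.reverse :: acc) (by simpa using h)]
        simp [splitX]
      · rw [show PySem.Chars.splitOn.go ['x'] (f+1) (c :: rest) cur acc =
              PySem.Chars.splitOn.go ['x'] f rest (c :: cur) acc by
            simp [PySem.Chars.splitOn.go, List.isPrefixOf, Ne.symm hc]]
        rw [ih f (c :: cur) acc (by simpa using Nat.le_of_succ_le_succ h)]
        simp [splitX, hc]

lemma splitOn_x (l : List Char) :
    PySem.Chars.splitOn l ['x'] = (splitX l).1 :: (splitX l).2 := by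
  rw [PySem.Chars.splitOn, splitOn_go_x l (l.length + 1) [] [] (by omega)]
  simp

-- A equals the length map over the segments
lemma solution_eq_map (s : String) :
    solution s = ((splitX s.toList).1 :: (splitX s.toList).2).map
      (fun seg => (seg.length : Int)) := by
  unfold solution
  rw [splitOn_x]
  rw [PySem.List.foldl_pyRange_zero_pyGetD'
        ((splitX s.toList).1 :: (splitX s.toList).2) ([] : List Char)
        (fun t seg => if seg = ([] : List Char) then t ++ [(0 : Int)]
                      else t ++ [(seg.length : Int)]) []]
  induction ((splitX s.toList).1 :: (splitX s.toList).2) using List.reverseRecOn with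
  | nil => simp
  | append_singleton xs x ih =>
    rw [List.foldl_append, List.map_append, ← ih]
    by_cases hx : x = ([] : List Char) <;> simp [hx]

-- B's fold invariant
lemma alt_fold (l : List Char) : ∀ (t : List Int) (cnt : Int),
    (l.foldl bstep (t, cnt)).1 ++ [(l.foldl bstep (t, cnt)).2] =
    t ++ (cnt + ((splitX l).1.length : Int)) ::
      (splitX l).2.map (fun seg => (seg.length : Int)) := by
  induction l with
  | nil => intro t cnt; simp [splitX]
  | cons c rest ih =>
    intro t cnt
    by_cases hc : c = 'x'
    · subst hc
      rw [List.foldl_cons, show bstep (t, cnt) 'x' = (t ++ [cnt], 0) by simp [bstep]]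
      rw [ih (t ++ [cnt]) 0]
      simp [splitX]
    · rw [List.foldl_cons, show bstep (t, cnt) c = (t, cnt + 1) by simp [bstep, hc]]
      rw [ih t (cnt + 1)]
      simp [splitX, hc]
      ring_nf

lemma alt_eq_map (s : String) :
    solution_alt s = ((splitX s.toList).1 :: (splitX s.toList).2).map
      (fun seg => (seg.length : Int)) := by
  unfold solution_alt
  have h := alt_fold s.toList [] 0
  simpa using h

-- ===== VERDICT (by name: the statement is the Claim_ definition above) =====
theorem solution_spec : Claim_equal_solution := by
  intro s _
  unfold Spec_solution
  rw [solution_eq_map, alt_eq_map]
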